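-- pv_equiv track=rewrite | github.com/DNopenaire/Conversion_Calculator | Convertor_Calculator.py | hexadecimal_vers_ip
-- ===== SOURCE A (Python) =====
-- def hexadecimal_vers_ip(hex_adresse):
--     try:
--         hex_adresse = hex_adresse.strip().lower().replace("0x", "")
--         hex_adresse = hex_adresse.zfill(8)
--         octets = [str(int(hex_adresse[i:i+2], 16)) for i in range(0, 8, 2)]
--         return '.'.join(octets)
--     except ValueError:
--         return "Erreur : Format hexadécimal incorrect."
-- ===== SOURCE B (Python) =====
-- def hexadecimal_vers_ip(hex_adresse):
--     s = hex_adresse.strip().lower().replace("0x", "").zfill(8)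
--     try:
--         return _fmt(list(s[:8]))
--     except ValueError:
--         return "Erreur : Format hexad\u00e9cimal incorrect."
--
-- def _fmt(chars):
--     # recursive pair-chunking: format the first pair, recurse on the rest
--     v = int(chars[0] + chars[1], 16)
--     rest = chars[2:]
--     return str(v) if not rest else str(v) + "." + _fmt(rest)
-- ===== Notes on version B (the rewrite author's own statement) =====
-- stated objective: alternative
-- what changed: Replaces the index-range (range(0,8,2)) slice-and-join list comprehension with a direct structural recursion that chunks the 8-char field two characters at a time and builds the dotted string as it returns.
import Mathlib
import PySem

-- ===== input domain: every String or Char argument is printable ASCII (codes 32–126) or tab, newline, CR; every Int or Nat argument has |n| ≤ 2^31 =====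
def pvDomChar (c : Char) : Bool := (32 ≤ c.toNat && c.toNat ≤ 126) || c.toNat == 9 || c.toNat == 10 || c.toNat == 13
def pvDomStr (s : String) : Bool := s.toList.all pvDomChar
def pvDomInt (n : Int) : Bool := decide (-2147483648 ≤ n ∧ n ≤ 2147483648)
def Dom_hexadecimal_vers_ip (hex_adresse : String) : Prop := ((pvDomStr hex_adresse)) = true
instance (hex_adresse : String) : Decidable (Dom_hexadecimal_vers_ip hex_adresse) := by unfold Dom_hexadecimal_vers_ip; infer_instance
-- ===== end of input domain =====

-- B replaces A's range(0,8,2) slice-and-join list comprehension by a structural recursion that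
-- chunks the 8-char field two characters at a time and builds the dotted string as it returns.

-- ===== PORT A =====
-- the comprehension [str(int(t[i:i+2],16)) for i in range(0,8,2)]: the first ValueError aborts it (none)
def pvOctetsA (t : String) : List Int → Option (List String)
  | [] => some []
  | i :: rest =>
    match PySem.Int.ofStrBase? (PySem.Str.slice t (some i) (some (i + 2))) 16 with
    | none => none
    | some v =>
      match pvOctetsA t rest with
      | none => none
      | some os => some (PySem.Int.toStr v :: os)

def hexadecimal_vers_ip (hex_adresse : String) : String :=
  let t := PySem.Str.zfill (PySem.Str.replace (PySem.Str.lower (PySem.Str.strip hex_adresse)) "0x" "") 8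
  match pvOctetsA t (PySem.List.pyRange 0 8 2) with
  | some octets => PySem.Str.join "." octets
  | none => "Erreur : Format hexadécimal incorrect."

-- ===== PORT B =====
-- _fmt: v = int(chars[0]+chars[1],16), then recurse on chars[2:]; none = the propagated ValueError
-- (the empty/singleton case is unreachable: _fmt is only ever applied to the 8-char field)
def pvFmtB : List Char → Option String
  | c1 :: c2 :: rest =>
    match PySem.Int.ofStrBase? (String.ofList [c1, c2]) 16 with
    | none => none
    | some v =>
      if rest = [] then some (PySem.Int.toStr v)
      else
        match pvFmtB rest with
        | none => none
        | some r => some (String.ofList ((PySem.Int.toStr v).toList ++ '.' :: r.toList))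
  | _ => none

def hexadecimal_vers_ip_alt (hex_adresse : String) : String :=
  let s := PySem.Str.zfill (PySem.Str.replace (PySem.Str.lower (PySem.Str.strip hex_adresse)) "0x" "") 8
  match pvFmtB (PySem.Str.slice s (some 0) (some 8)).toList with
  | some r => r
  | none => "Erreur : Format hexadécimal incorrect."

-- ===== PRECONDITION & SPEC =====
def Spec_hexadecimal_vers_ip (hex_adresse : String) (out : String) : Prop := out = hexadecimal_vers_ip_alt hex_adresse
instance (hex_adresse : String) (out : String) : Decidable (Spec_hexadecimal_vers_ip hex_adresse out) := by unfold Spec_hexadecimal_vers_ip; infer_instance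

-- ===== CLAIM (what is proved, stated in full; the proofs are below) =====
def Claim_equal_hexadecimal_vers_ip : Prop := ∀ (hex_adresse : String), Dom_hexadecimal_vers_ip hex_adresse → Spec_hexadecimal_vers_ip hex_adresse (hexadecimal_vers_ip hex_adresse)

-- ===== LEMMAS AND PROOFS =====

-- on any string whose first 8 characters are c0…c7, A's indexed comprehension and B's
-- pair-chunking recursion produce the same string (case analysis on the four pair parses)
theorem pvKey (t : String) (c0 c1 c2 c3 c4 c5 c6 c7 : Char) (rest : List Char)
    (ht : t.toList = c0::c1::c2::c3::c4::c5::c6::c7::rest) :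
    (match pvOctetsA t (PySem.List.pyRange 0 8 2) with
      | some octets => PySem.Str.join "." octets
      | none => "Erreur : Format hexadécimal incorrect.") =
    (match pvFmtB (PySem.Str.slice t (some 0) (some 8)).toList with
      | some r => r
      | none => "Erreur : Format hexadécimal incorrect.") := by
  have hr : PySem.List.pyRange 0 8 2 = [0,2,4,6] := by decide
  have h8 : (PySem.Str.slice t (some 0) (some 8)).toList = [c0,c1,c2,c3,c4,c5,c6,c7] := by
    simp [ht, PySem.List.slice]
  have h01 : (PySem.Str.slice t (some 0) (some (0 + 2))).toList = [c0,c1] := by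
    simp [ht, PySem.List.slice]
  have h23 : (PySem.Str.slice t (some 2) (some (2 + 2))).toList = [c2,c3] := by
    simp [ht, PySem.List.slice]
  have h45 : (PySem.Str.slice t (some 4) (some (4 + 2))).toList = [c4,c5] := by
    simp [ht, PySem.List.slice]
  have h67 : (PySem.Str.slice t (some 6) (some (6 + 2))).toList = [c6,c7] := by
    simp [ht, PySem.List.slice]
  rw [hr, h8]
  simp only [pvOctetsA, pvFmtB, PySem.Int.ofStrBase?, h01, h23, h45, h67, String.toList_ofList]
  cases PySem.Int.ofCharsBase? [c0,c1] 16 <;>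
  cases PySem.Int.ofCharsBase? [c2,c3] 16 <;>
  cases PySem.Int.ofCharsBase? [c4,c5] 16 <;>
  cases PySem.Int.ofCharsBase? [c6,c7] 16 <;>
  simp [PySem.Str.join, PySem.Chars.join, List.intercalate]

-- ===== VERDICT (by name: the statement is the Claim_ definition above) =====
theorem hexadecimal_vers_ip_spec : Claim_equal_hexadecimal_vers_ip := by
  intro h _
  unfold Spec_hexadecimal_vers_ip hexadecimal_vers_ip hexadecimal_vers_ip_alt
  have hlen : 8 ≤ (PySem.Str.zfill (PySem.Str.replace (PySem.Str.lower (PySem.Str.strip h)) "0x" "") 8).toList.length := by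
    simp only [PySem.Str.toList_zfill, PySem.Chars.length_zfill]
    omega
  generalize PySem.Str.zfill (PySem.Str.replace (PySem.Str.lower (PySem.Str.strip h)) "0x" "") 8 = t at hlen ⊢
  rcases ht : t.toList with _|⟨c0,_|⟨c1,_|⟨c2,_|⟨c3,_|⟨c4,_|⟨c5,_|⟨c6,_|⟨c7,rest⟩⟩⟩⟩⟩⟩⟩⟩ <;>
    first
      | exact pvKey t c0 c1 c2 c3 c4 c5 c6 c7 rest ht
      | (rw [ht] at hlen; simp at hlen)
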